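-- pv_equiv track=rewrite | github.com/kronostacis/Programas-GitHub | proyect.py | primolandia
-- ===== SOURCE A (Python) =====
-- def primolandia(factores):
--     factores.sort(reverse=True)
--     traduccion=''
--     for count,l in enumerate(factores):
--         if l != factores[count-1] or count==0:
--             potent=factores.count(l)
--             traduccion = traduccion + str(l) + ' ' + str(potent) + ' '
--     return traduccion
-- ===== SOURCE B (Python) =====
-- def primolandia(factores):
--     factores.sort(reverse=True)
--     parts = []
--     prev = None
--     run = 0
--     for v in factores:
--         if prev is not None and v == prev:
--             run += 1
--         else:
--             if prev is not None:
--                 parts.append(str(prev) + ' ' + str(run) + ' ')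
--             prev = v
--             run = 1
--     if prev is not None:
--         parts.append(str(prev) + ' ' + str(run) + ' ')
--     return ''.join(parts)
-- ===== Notes on version B (the rewrite author's own statement) =====
-- stated objective: faster
-- what changed: B sorts descending (keeping A's in-place mutation) and then does ONE linear run-length pass carrying (prev, run-length) state, emitting each value with its accumulated run length at the run boundary and joining the pieces at the end; it never counts occurrences at all, whereas A loops over every index, compares with the predecessor element and rescans the whole list with .count at each run start.
import Mathlib
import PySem

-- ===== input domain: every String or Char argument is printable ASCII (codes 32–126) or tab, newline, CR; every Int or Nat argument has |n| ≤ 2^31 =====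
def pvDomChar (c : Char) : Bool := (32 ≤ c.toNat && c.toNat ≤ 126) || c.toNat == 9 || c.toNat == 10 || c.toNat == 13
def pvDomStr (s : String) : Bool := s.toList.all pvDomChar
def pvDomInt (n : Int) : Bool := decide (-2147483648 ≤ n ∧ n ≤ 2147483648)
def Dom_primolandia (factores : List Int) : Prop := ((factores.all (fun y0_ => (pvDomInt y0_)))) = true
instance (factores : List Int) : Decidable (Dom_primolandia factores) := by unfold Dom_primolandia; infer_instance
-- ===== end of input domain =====

-- B replaces A's per-index loop (which rescans the list with .count at every run start)
-- by one linear run-length pass over the sorted list carrying (prev, run) state.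
-- Both A and B sort the argument in place in Python (same side effect); the theorems
-- below are about the return value.

-- ===== PORT A =====
-- the index count-1 is always in range inside the loop (at count=0 Python reads
-- factores[-1], the last element of a then-nonempty list, and 'or count==0' makes the
-- branch fire anyway), so pyGetD is exact here
def primolandia (factores : List Int) : String :=
  let s := PySem.List.sorted factores (fun x => x) true
  (PySem.List.enumerate s 0).foldl
    (fun trad q =>
      if q.2 ≠ PySem.List.pyGetD s (q.1 - 1) 0 ∨ q.1 = 0 then
        trad ++ PySem.Int.toStr q.2 ++ " " ++ PySem.Int.toStr ((PySem.List.count s q.2 : Int)) ++ " "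
      else trad) ""

-- ===== PORT B =====
-- the loop body of Source B: state = (prev/run as Option (Int × Int), the parts list)
def pvStepB (st : Option (Int × Int) × List String) (v : Int) : Option (Int × Int) × List String :=
  match st.1 with
  | some (p, run) =>
      if v = p then (some (p, run + 1), st.2)
      else (some (v, 1), st.2 ++ [PySem.Int.toStr p ++ " " ++ PySem.Int.toStr run ++ " "])
  | none => (some (v, 1), st.2)

def primolandia_alt (factores : List Int) : String :=
  let s := PySem.List.sorted factores (fun x => x) true
  let st := s.foldl pvStepB (none, [])
  match st.1 with
  | some (p, run) => String.join (st.2 ++ [PySem.Int.toStr p ++ " " ++ PySem.Int.toStr run ++ " "])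
  | none => String.join st.2

-- ===== PRECONDITION & SPEC =====
def Spec_primolandia (factores : List Int) (out : String) : Prop := out = primolandia_alt factores
instance (factores : List Int) (out : String) : Decidable (Spec_primolandia factores out) := by unfold Spec_primolandia; infer_instance

-- ===== CLAIM (what is proved, stated in full; the proofs are below) =====
def Claim_equal_primolandia : Prop := ∀ (factores : List Int), Dom_primolandia factores → Spec_primolandia factores (primolandia factores)

-- ===== LEMMAS AND PROOFS =====

def pvPiece (v c : Int) : String := PySem.Int.toStr v ++ " " ++ PySem.Int.toStr c ++ " "

-- A's loop with the index bookkeeping replaced by the previous element carried as state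
def auxA (c : Int → Int) : Option Int → List Int → String → String
  | _, [], acc => acc
  | none, x :: t, acc =>
      auxA c (some x) t (acc ++ pvPiece x (c x))
  | some p, x :: t, acc =>
      auxA c (some x) t (if x ≠ p then acc ++ pvPiece x (c x) else acc)

lemma auxA_eq_enumFold (c : Int → Int) (s : List Int) :
    ∀ (t p : List Int) (acc : String), s = p ++ t →
      (PySem.List.enumerate t (p.length : Int)).foldl
        (fun trad q =>
          if q.2 ≠ PySem.List.pyGetD s (q.1 - 1) 0 ∨ q.1 = 0 then
            trad ++ PySem.Int.toStr q.2 ++ " " ++ PySem.Int.toStr (c q.2) ++ " "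
          else trad) acc
      = auxA c p.getLast? t acc := by
  intro t
  induction t with
  | nil => intro p acc _; simp [PySem.List.enumerate_nil, auxA]
  | cons x t' ih =>
    intro p acc hs
    rw [PySem.List.enumerate_cons, List.foldl_cons]
    have hcast : ((p.length : Int) + 1) = (((p ++ [x]).length : Int)) := by
      simp
    rw [hcast]
    rw [ih (p ++ [x]) _ (by simpa using hs)]
    rw [List.getLast?_concat]
    rcases List.eq_nil_or_concat p with rfl | ⟨p'', z, rfl⟩
    · simp only [List.getLast?_nil, auxA]
      congr 1
      rw [if_pos (Or.inr (by simp))]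
      simp [pvPiece, String.append_assoc]
    · simp only [List.concat_eq_append] at hs ⊢
      rw [List.getLast?_concat]
      simp only [auxA]
      congr 1
      have hi : (((p'' ++ [z]).length : Int)) - 1 = (p''.length : Int) := by simp
      have hs' : s = p'' ++ (z :: x :: t') := by simp [hs]
      have hget : PySem.List.pyGetD s ((((p'' ++ [z]).length : Int)) - 1) 0 = z := by
        rw [hi, hs']
        rw [PySem.List.pyGetD_eq_getElem _ _ (by positivity)
          (by simp only [List.length_append, List.length_cons]; push_cast; omega)]
        simp only [Int.toNat_natCast]
        rw [List.getElem_append_right (le_refl p''.length)]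
        simp
      rw [hget]
      have hlen0 : ¬ ((((p'' ++ [z]).length : Int)) = 0) := by
        simp only [List.length_append, List.length_cons, List.length_nil]
        push_cast
        omega
      by_cases hxe : x = z
      · have hcond : ¬ (x ≠ z ∨ (((p'' ++ [z]).length : Int)) = 0) := by
          push Not
          exact ⟨hxe, hlen0⟩
        rw [if_neg hcond, if_neg (by simp [hxe])]
      · rw [if_pos (Or.inl hxe), if_pos hxe]
        simp [pvPiece, String.append_assoc]

lemma auxA_some_eq (c : Int → Int) :
    ∀ (t : List Int) (prev : Int) (acc : String),
      t.Pairwise (fun a b => b ≤ a) → (∀ y ∈ t, y ≤ prev) →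
      auxA c (some prev) t acc
        = (PySem.Set.discard (PySem.Set.ofList t) prev).foldl
            (fun a v => a ++ pvPiece v (c v)) acc := by
  intro t
  induction t with
  | nil => intro prev acc _ _; simp [auxA, PySem.Set.ofList_nil, PySem.Set.discard]
  | cons x t' ih =>
    intro prev acc hp hle
    have hx : x ≤ prev := hle x (by simp)
    have hp' : t'.Pairwise (fun a b => b ≤ a) := (List.pairwise_cons.1 hp).2
    have hxall : ∀ y ∈ t', y ≤ x := (List.pairwise_cons.1 hp).1
    rw [PySem.Set.ofList_cons]
    by_cases hxe : x = prev
    · subst hxe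
      have hd : PySem.Set.discard (x :: PySem.Set.discard (PySem.Set.ofList t') x) x
          = PySem.Set.discard (PySem.Set.ofList t') x := by
        simp [PySem.Set.discard, List.filter_filter]
      rw [hd]
      simp only [auxA]
      rw [if_neg (by simp)]
      exact ih x acc hp' hxall
    · have hlt : ∀ y ∈ List.filter (fun y => !(y == x)) (PySem.Set.ofList t'), (!(y == prev)) = true := by
        intro y hy
        have hyt : y ∈ t' := (PySem.Set.mem_ofList t' y).1 (List.mem_of_mem_filter hy)
        have hylt : y < prev := lt_of_le_of_lt (hxall y hyt) (lt_of_le_of_ne hx hxe)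
        simp [hylt.ne]
      have hd : PySem.Set.discard (x :: PySem.Set.discard (PySem.Set.ofList t') x) prev
          = x :: PySem.Set.discard (PySem.Set.ofList t') x := by
        simp only [PySem.Set.discard]
        rw [List.filter_cons, if_pos (by simp [hxe]), List.filter_eq_self.2 hlt]
      rw [hd, List.foldl_cons]
      simp only [auxA]
      rw [if_pos hxe]
      exact ih x _ hp' hxall

lemma auxA_none_eq (c : Int → Int) (s : List Int) (h : s.Pairwise (fun a b => b ≤ a)) :
    auxA c none s ""
      = (PySem.Set.ofList s).foldl
          (fun a v => a ++ pvPiece v (c v)) "" := by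
  cases s with
  | nil => simp [auxA, PySem.Set.ofList_nil]
  | cons x t =>
    rw [PySem.Set.ofList_cons, List.foldl_cons]
    simp only [auxA]
    exact auxA_some_eq c t x _ (List.pairwise_cons.1 h).2 (List.pairwise_cons.1 h).1

lemma foldl_str : ∀ (t : List String) (acc : String),
    t.foldl (fun a v => a ++ v) acc = acc ++ String.join t := by
  intro t
  induction t with
  | nil => intro acc; simp [String.join]
  | cons x t ih =>
      intro acc
      have hj : String.join (x :: t) = x ++ String.join t := by
        conv_lhs => simp only [String.join, List.foldl_cons]
        rw [ih]
        simp [String.join]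
      rw [List.foldl_cons, ih, hj, String.append_assoc]

lemma foldl_append_eq_join (f : Int → String) (l : List Int) (acc : String) :
    l.foldl (fun a v => a ++ f v) acc = acc ++ String.join (l.map f) := by
  rw [← List.foldl_map, foldl_str]

-- B's flush step: append the pending (prev, run) piece if any, then join
def pvFlush (st : Option (Int × Int) × List String) : List String :=
  match st.1 with
  | some (p, run) => st.2 ++ [PySem.Int.toStr p ++ " " ++ PySem.Int.toStr run ++ " "]
  | none => st.2

-- run-length invariant of B's fold: on a descending suffix whose elements are ≤ prev,
-- the finished parts list is the pending run (completed by counting prev's in t)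
-- followed by one piece per remaining distinct value with its multiplicity in t
lemma foldB_run (t : List Int) :
    ∀ (p run : Int) (l : List String),
      t.Pairwise (fun a b => b ≤ a) → (∀ y ∈ t, y ≤ p) →
      pvFlush (t.foldl pvStepB (some (p, run), l))
        = l ++ pvPiece p (run + (t.count p : Int))
            :: (PySem.Set.discard (PySem.Set.ofList t) p).map (fun v => pvPiece v (t.count v : Int)) := by
  induction t with
  | nil => intro p run l _ _; simp [pvFlush, pvPiece, PySem.Set.ofList_nil, PySem.Set.discard]
  | cons x t' ih =>
    intro p run l hp hle
    have hx : x ≤ p := hle x (by simp)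
    have hp' : t'.Pairwise (fun a b => b ≤ a) := (List.pairwise_cons.1 hp).2
    have hxall : ∀ y ∈ t', y ≤ x := (List.pairwise_cons.1 hp).1
    rw [List.foldl_cons]
    by_cases hxe : x = p
    · subst hxe
      have hstep : pvStepB (some (x, run), l) x = (some (x, run + 1), l) := by
        simp [pvStepB]
      rw [hstep, ih x (run + 1) l hp' hxall, List.count_cons_self]
      have harg : run + 1 + ((t'.count x : Nat) : Int) = run + (((t'.count x + 1 : Nat) : Nat) : Int) := by
        push_cast; ring
      rw [harg]
      have hd : PySem.Set.discard (PySem.Set.ofList (x :: t')) x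
          = PySem.Set.discard (PySem.Set.ofList t') x := by
        rw [PySem.Set.ofList_cons]
        simp [PySem.Set.discard, List.filter_filter]
      rw [hd]
      have hmap : (PySem.Set.discard (PySem.Set.ofList t') x).map
            (fun v => pvPiece v (((x :: t').count v : Nat) : Int))
          = (PySem.Set.discard (PySem.Set.ofList t') x).map
            (fun v => pvPiece v ((t'.count v : Nat) : Int)) := by
        apply List.map_congr_left
        intro v hv
        have hvx : v ≠ x := ((PySem.Set.mem_discard (PySem.Set.ofList t') x v).1 hv).2
        rw [List.count_cons_of_ne (Ne.symm hvx)]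
      rw [hmap]
    · have hstep : pvStepB (some (p, run), l) x
          = (some (x, 1), l ++ [PySem.Int.toStr p ++ " " ++ PySem.Int.toStr run ++ " "]) := by
        simp [pvStepB, hxe]
      rw [hstep, ih x 1 _ hp' hxall]
      have hcp : (x :: t').count p = 0 := by
        rw [List.count_eq_zero]
        intro hmem
        rcases List.mem_cons.1 hmem with h | h
        · exact hxe h.symm
        · exact absurd (lt_of_le_of_lt (hxall p h) (lt_of_le_of_ne hx hxe)) (lt_irrefl p)
      have hdp : PySem.Set.discard (PySem.Set.ofList (x :: t')) p
          = x :: PySem.Set.discard (PySem.Set.ofList t') x := by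
        rw [PySem.Set.ofList_cons]
        simp only [PySem.Set.discard]
        rw [List.filter_cons, if_pos (by simp [hxe]), List.filter_eq_self.2]
        intro y hy
        have hyt : y ∈ t' := (PySem.Set.mem_ofList t' y).1 (List.mem_of_mem_filter hy)
        have hylt : y < p := lt_of_le_of_lt (hxall y hyt) (lt_of_le_of_ne hx hxe)
        simp [hylt.ne]
      rw [hcp, hdp]
      simp only [List.map_cons, Nat.cast_zero, add_zero]
      rw [List.append_assoc]
      congr 1
      simp only [List.singleton_append]
      rw [List.count_cons_self,
        show (((t'.count x + 1 : Nat)) : Int) = 1 + (t'.count x : Int) from by push_cast; ring]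
      have hmap2 : (PySem.Set.discard (PySem.Set.ofList t') x).map
            (fun v => pvPiece v (((x :: t').count v : Nat) : Int))
          = (PySem.Set.discard (PySem.Set.ofList t') x).map
            (fun v => pvPiece v ((t'.count v : Nat) : Int)) := by
        apply List.map_congr_left
        intro v hv
        have hvx : v ≠ x := ((PySem.Set.mem_discard (PySem.Set.ofList t') x v).1 hv).2
        rw [List.count_cons_of_ne (Ne.symm hvx)]
      rw [hmap2]
      simp [pvPiece]

lemma foldB_eq (s : List Int) (h : s.Pairwise (fun a b => b ≤ a)) :
    pvFlush (s.foldl pvStepB (none, []))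
      = (PySem.Set.ofList s).map (fun v => pvPiece v (s.count v : Int)) := by
  cases s with
  | nil => simp [pvFlush, PySem.Set.ofList_nil]
  | cons x t =>
    rw [List.foldl_cons]
    have hstep : pvStepB ((none, []) : Option (Int × Int) × List String) x = (some (x, 1), []) := by
      simp [pvStepB]
    rw [hstep, foldB_run t x 1 [] (List.pairwise_cons.1 h).2 (List.pairwise_cons.1 h).1]
    rw [PySem.Set.ofList_cons, List.map_cons, List.nil_append]
    rw [List.count_cons_self,
      show (((t.count x + 1 : Nat)) : Int) = 1 + (t.count x : Int) from by push_cast; ring]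
    have hmap2 : (PySem.Set.discard (PySem.Set.ofList t) x).map
          (fun v => pvPiece v (((x :: t).count v : Nat) : Int))
        = (PySem.Set.discard (PySem.Set.ofList t) x).map
          (fun v => pvPiece v ((t.count v : Nat) : Int)) := by
      apply List.map_congr_left
      intro v hv
      have hvx : v ≠ x := ((PySem.Set.mem_discard (PySem.Set.ofList t) x v).1 hv).2
      rw [List.count_cons_of_ne (Ne.symm hvx)]
    rw [hmap2]

-- ===== VERDICT (by name: the statement is the Claim_ definition above) =====
theorem primolandia_spec : Claim_equal_primolandia := by
  intro factores _
  unfold Spec_primolandia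
  have hsorted := PySem.List.sorted_pairwise_rev factores (fun x => x)
  have hB : primolandia_alt factores
      = String.join (pvFlush ((PySem.List.sorted factores (fun x => x) true).foldl pvStepB (none, []))) := by
    simp only [primolandia_alt]
    rcases hst : (PySem.List.sorted factores (fun x => x) true).foldl pvStepB (none, []) with ⟨o, parts⟩
    rcases o with _ | ⟨p, run⟩ <;> simp [pvFlush]
  have hA : primolandia factores
      = auxA (fun v => (PySem.List.count (PySem.List.sorted factores (fun x => x) true) v : Int)) none
          (PySem.List.sorted factores (fun x => x) true) "" := by
    simp only [primolandia]
    have h := auxA_eq_enumFold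
        (fun v => (PySem.List.count (PySem.List.sorted factores (fun x => x) true) v : Int))
        (PySem.List.sorted factores (fun x => x) true)
        (PySem.List.sorted factores (fun x => x) true) [] "" (by simp)
    simp only [List.length_nil, Nat.cast_zero, List.getLast?_nil] at h
    exact h
  rw [hA, hB, auxA_none_eq _ _ hsorted, foldB_eq _ hsorted, foldl_append_eq_join]
  simp [PySem.List.count_eq]
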